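-- pv_equiv track=rewrite | github.com/apoorvrajdev/image-captioning-system | src/captioning/evaluation/inspection.py | _longest_repeat_run
-- ===== SOURCE A (Python) =====
-- from collections.abc import Iterable, Sequence
-- from itertools import pairwise
--
-- def _longest_repeat_run(tokens: Sequence[str]) -> int:
--     """Return the longest run of immediately-repeated tokens.
--
--     Example: ``["a", "a", "a", "dog"]`` -> ``3``. Used to flag the classic
--     transformer-decoder collapse where the same token is emitted on every step.
--     """
--     if not tokens:
--         return 0
--     best = current = 1
--     for prev, cur in pairwise(tokens):
--         current = current + 1 if cur == prev else 1
--         best = max(best, current)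
--     return best
-- ===== SOURCE B (Python) =====
-- from itertools import groupby
--
-- def _longest_repeat_run(tokens):
--     """Return the longest run of immediately-repeated tokens."""
--     return max((sum(1 for _ in g) for _, g in groupby(tokens)), default=0)
-- ===== Notes on version B (the rewrite author's own statement) =====
-- stated objective: idiomatic
-- what changed: Replaces the pairwise loop with a running best/current accumulator by a group-then-reduce decomposition: itertools.groupby partitions the list into maximal runs, and max over the run lengths (default 0) gives the answer.
import Mathlib
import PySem

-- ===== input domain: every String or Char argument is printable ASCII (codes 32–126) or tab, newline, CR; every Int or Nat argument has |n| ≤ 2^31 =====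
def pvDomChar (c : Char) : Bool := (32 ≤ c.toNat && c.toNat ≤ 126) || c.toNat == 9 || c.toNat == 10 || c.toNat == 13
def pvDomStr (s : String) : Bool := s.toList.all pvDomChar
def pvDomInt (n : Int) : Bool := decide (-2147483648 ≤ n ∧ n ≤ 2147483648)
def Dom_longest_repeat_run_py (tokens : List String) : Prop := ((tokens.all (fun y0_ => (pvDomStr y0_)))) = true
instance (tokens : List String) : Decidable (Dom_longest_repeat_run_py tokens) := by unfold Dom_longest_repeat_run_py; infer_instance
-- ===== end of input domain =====

-- B replaces A's running best/current accumulator over pairwise tokens by a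
-- groupby-style group-then-reduce: split into maximal runs, take max of lengths (idiomatic).

-- ===== PORT A =====
-- the loop 'for prev, cur in pairwise(tokens)' with state (best, current)
def pvPairLoop : List (String × String) → Int → Int → Int
  | [], best, _ => best
  | (prev, cur) :: ps, best, current =>
    let current' := if cur == prev then current + 1 else 1
    pvPairLoop ps (max best current') current'

def longest_repeat_run_py (tokens : List String) : Int :=
  match tokens with
  | [] => 0
  | _ => pvPairLoop (tokens.zip tokens.tail) 1 1

-- ===== PORT B =====
-- groupby: consume the maximal run of x at the head (length of the tail part, rest)
def pvTakeRun (x : String) : List String → Nat × List String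
  | [] => (0, [])
  | y :: ys => if y == x then let (n, r) := pvTakeRun x ys; (n + 1, r) else (0, y :: ys)

theorem pvTakeRun_len (x : String) : ∀ (l : List String), (pvTakeRun x l).2.length ≤ l.length := by
  intro l
  induction l with
  | nil => simp [pvTakeRun]
  | cons y ys ih =>
    simp only [pvTakeRun]
    split
    · simpa using Nat.le_succ_of_le ih
    · simp

-- run lengths of the maximal groups, in order (the 'sum(1 for _ in g)' values)
def pvGroupLens : List String → List Int
  | [] => []
  | x :: xs =>
    (1 + ((pvTakeRun x xs).1 : Int)) :: pvGroupLens (pvTakeRun x xs).2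
-- termination: the rest after a run is no longer than the tail
termination_by l => l.length
decreasing_by
  exact Nat.lt_succ_of_le (pvTakeRun_len x xs)

-- Python's max(iterable, default=d)
def pvPyMaxD (d : Int) : List Int → Int
  | [] => d
  | a :: l => l.foldl max a

def longest_repeat_run_py_alt (tokens : List String) : Int :=
  pvPyMaxD 0 (pvGroupLens tokens)

-- ===== PRECONDITION & SPEC =====
def Spec_longest_repeat_run_py (tokens : List String) (out : Int) : Prop := out = longest_repeat_run_py_alt tokens
instance (tokens : List String) (out : Int) : Decidable (Spec_longest_repeat_run_py tokens out) := by unfold Spec_longest_repeat_run_py; infer_instance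

-- ===== CLAIM (what is proved, stated in full; the proofs are below) =====
def Claim_equal_longest_repeat_run_py : Prop := ∀ (tokens : List String), Dom_longest_repeat_run_py tokens → Spec_longest_repeat_run_py tokens (longest_repeat_run_py tokens)

-- ===== LEMMAS AND PROOFS =====

-- the completed-run values seen by A's loop, current count c on an open run of x
def pvRunVals (c : Int) (x : String) : List String → List Int
  | [] => [c]
  | y :: ys => if y == x then pvRunVals (c + 1) x ys else c :: pvRunVals 1 y ys

theorem pvRunVals_ge (x : String) : ∀ (ys : List String) (c : Int), ∃ v ∈ pvRunVals c x ys, c ≤ v := by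
  intro ys
  induction ys generalizing x with
  | nil => intro c; exact ⟨c, by simp [pvRunVals]⟩
  | cons y ys ih =>
    intro c
    by_cases h : y == x
    · obtain ⟨v, hv, hcv⟩ := ih x (c + 1)
      exact ⟨v, by simp [pvRunVals, h, hv], by omega⟩
    · exact ⟨c, by simp [pvRunVals, h], le_refl c⟩

theorem pvFoldlMax_absorb : ∀ (l : List Int) (b c : Int), (∃ v ∈ l, c ≤ v) →
    l.foldl max (max b c) = l.foldl max b := by
  intro l
  induction l with
  | nil => intro b c h; simp at h
  | cons a l ih =>
    intro b c h
    obtain ⟨v, hv, hcv⟩ := h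
    simp only [List.mem_cons] at hv
    rcases hv with rfl | hv
    · simp only [List.foldl_cons]
      congr 1
      omega
    · simp only [List.foldl_cons]
      have : max (max b c) a = max (max b a) c := by omega
      rw [this, ih (max b a) c ⟨v, hv, hcv⟩]

-- A's loop over the remaining pairs computes max of best and the completed-run values
theorem pvPairLoop_eq : ∀ (xs : List String) (x : String) (best c : Int), 1 ≤ c → c ≤ best →
    pvPairLoop ((x :: xs).zip xs) best c = (pvRunVals c x xs).foldl max best := by
  intro xs
  induction xs with
  | nil =>
    intro x best c h1 hcb
    simp only [List.zip_nil_right, pvPairLoop, pvRunVals, List.foldl_cons, List.foldl_nil]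
    omega
  | cons y ys ih =>
    intro x best c h1 hcb
    by_cases h : y == x
    · simp only [List.zip_cons_cons, pvPairLoop, pvRunVals, h, if_pos]
      rw [ih y (max best (c + 1)) (c + 1) (by omega) (by omega)]
      have hyx : y = x := by simpa using h
      subst hyx
      exact pvFoldlMax_absorb _ best (c + 1) (pvRunVals_ge y ys (c + 1))
    · simp only [List.zip_cons_cons, pvPairLoop, pvRunVals, h, if_neg, Bool.false_eq_true,
        not_false_iff]
      rw [ih y (max best 1) 1 (le_refl 1) (by omega)]
      have hb1 : max best 1 = best := by omega
      have hbc : max best c = best := by omega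
      rw [hb1, List.foldl_cons, hbc]

-- the completed-run values are the group lengths, with the open run's count folded in
theorem pvRunVals_groupLens : ∀ (xs : List String) (x : String) (c : Int),
    pvRunVals c x xs = (c + ((pvTakeRun x xs).1 : Int)) :: pvGroupLens (pvTakeRun x xs).2 := by
  intro xs
  induction xs with
  | nil => intro x c; simp [pvRunVals, pvTakeRun, pvGroupLens]
  | cons y ys ih =>
    intro x c
    by_cases h : y == x
    · simp only [pvRunVals, pvTakeRun, h, if_pos]
      rw [ih x (c + 1)]
      congr 1
      push_cast
      ring
    · simp only [pvRunVals, pvTakeRun, h, if_neg, Bool.false_eq_true, not_false_iff]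
      rw [ih y 1, pvGroupLens]
      simp

-- ===== VERDICT (by name: the statement is the Claim_ definition above) =====
theorem longest_repeat_run_py_spec : Claim_equal_longest_repeat_run_py := by
  unfold Claim_equal_longest_repeat_run_py
  intro tokens _
  unfold Spec_longest_repeat_run_py longest_repeat_run_py longest_repeat_run_py_alt
  match tokens with
  | [] => simp [pvGroupLens, pvPyMaxD]
  | x :: xs =>
    simp only [List.tail_cons]
    rw [pvPairLoop_eq xs x 1 1 (le_refl 1) (le_refl 1), pvRunVals_groupLens]
    rw [pvGroupLens]
    simp only [pvPyMaxD, List.foldl_cons]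
    congr 1
    omega
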